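-- pv_equiv track=rewrite | github.com/Dron939-sketch/- | ops/status.py | _rollup
-- ===== SOURCE A (Python) =====
-- from typing import Any, Dict, Optional
--
-- def _rollup(probes: Dict[str, Dict[str, Any]]) -> str:
--     """Overall status: `down` beats `stale` beats `disabled`/`starting` beats `ok`."""
--     statuses = {p.get("status") for p in probes.values()}
--     if "down" in statuses:
--         return "down"
--     if "stale" in statuses:
--         return "degraded"
--     if statuses <= {"ok", "disabled", "starting"} and "ok" in statuses:
--         return "ok"
--     return "degraded"
-- ===== SOURCE B (Python) =====
-- SEV = {"down": 4, "stale": 3, "ok": 1, "disabled": 0, "starting": 0}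
--
-- def _rollup(probes):
--     worst = 0
--     for p in probes.values():
--         worst = max(worst, SEV.get(p.get("status"), 2))
--     return "down" if worst == 4 else "ok" if worst == 1 else "degraded"
-- ===== Notes on version B (the rewrite author's own statement) =====
-- stated objective: alternative
-- what changed: Replaces A's materialised status set with membership/subset tests by a severity lattice: each status is mapped through a rank table (down=4, stale=3, unknown=2, ok=1, disabled/starting=0), the ranks are max-reduced in one pass, and the answer is decoded from the single worst rank.
import Mathlib
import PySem

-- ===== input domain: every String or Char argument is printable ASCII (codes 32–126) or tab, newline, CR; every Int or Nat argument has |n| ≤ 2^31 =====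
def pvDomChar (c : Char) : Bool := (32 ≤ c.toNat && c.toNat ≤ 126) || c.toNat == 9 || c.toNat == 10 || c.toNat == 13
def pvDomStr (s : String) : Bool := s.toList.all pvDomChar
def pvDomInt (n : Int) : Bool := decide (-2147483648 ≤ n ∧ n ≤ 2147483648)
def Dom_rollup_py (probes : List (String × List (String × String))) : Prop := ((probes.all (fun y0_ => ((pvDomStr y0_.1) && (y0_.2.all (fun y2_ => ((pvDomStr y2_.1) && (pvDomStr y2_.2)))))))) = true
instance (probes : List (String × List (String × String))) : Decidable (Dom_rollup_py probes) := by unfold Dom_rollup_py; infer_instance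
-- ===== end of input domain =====

-- B replaces A's status set and subset/membership tests by a severity lattice: a rank table,
-- a one-pass max reduction, and a decode of the single worst rank (alternative, same cost).

-- ===== PORT A =====
def rollup_py (probes : List (String × List (String × String))) : String :=
  let statuses : PySem.Set (Option String) :=
    PySem.Set.ofList (((PySem.Dict.ofList probes).values).map
      (fun p => (PySem.Dict.ofList p).get? "status"))
  if statuses.contains (some "down") then "down"
  else if statuses.contains (some "stale") then "degraded"
  else if statuses.issubset (PySem.Set.ofList [some "ok", some "disabled", some "starting"])
          && statuses.contains (some "ok") then "ok"
  else "degraded"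

-- ===== PORT B =====
-- the module-level SEV table of Source B
def pvSEV : PySem.Dict String Int :=
  PySem.Dict.ofList [("down", 4), ("stale", 3), ("ok", 1), ("disabled", 0), ("starting", 0)]

-- SEV.get(s, 2) where s = p.get("status") may be None (a None key matches no str key → default 2)
def pvSevGet (s : Option String) : Int :=
  match s with
  | some t => pvSEV.getD t 2
  | none => 2

def rollup_py_alt (probes : List (String × List (String × String))) : String :=
  let worst : Int :=
    ((PySem.Dict.ofList probes).values).foldl
      (fun w p => max w (pvSevGet ((PySem.Dict.ofList p).get? "status"))) 0
  if worst == 4 then "down" else if worst == 1 then "ok" else "degraded"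

-- ===== PRECONDITION & SPEC =====
def Spec_rollup_py (probes : List (String × List (String × String))) (out : String) : Prop := out = rollup_py_alt probes
instance (probes : List (String × List (String × String))) (out : String) : Decidable (Spec_rollup_py probes out) := by unfold Spec_rollup_py; infer_instance

-- ===== CLAIM (what is proved, stated in full; the proofs are below) =====
def Claim_equal_rollup_py : Prop := ∀ (probes : List (String × List (String × String))), Dom_rollup_py probes → Spec_rollup_py probes (rollup_py probes)

-- ===== LEMMAS AND PROOFS =====

-- a status outside the five known ones ("extra"), forcing degraded in both programs
def pvExtra (s : Option String) : Bool :=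
  !(s == some "down" || s == some "stale" || s == some "ok" ||
    s == some "disabled" || s == some "starting")

-- the worst severity present in a list of statuses (0 when empty)
def pvC (ss : List (Option String)) : Int :=
  if ss.any (· == some "down") then 4
  else if ss.any (· == some "stale") then 3
  else if ss.any pvExtra then 2
  else if ss.any (· == some "ok") then 1
  else 0

-- Source B's SEV.get(s, 2), written as the if-chain of status classes
lemma pvSev_eq (s : Option String) :
    pvSevGet s =
      (if s == some "down" then 4 else if s == some "stale" then 3
       else if s == some "ok" then 1
       else if s == some "disabled" || s == some "starting" then 0 else 2) := by
  match s with
  | none => decide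
  | some t =>
    by_cases k1 : t = "down"
    · subst k1; decide
    by_cases k2 : t = "stale"
    · subst k2; decide
    by_cases k3 : t = "ok"
    · subst k3; decide
    by_cases k4 : t = "disabled"
    · subst k4; decide
    by_cases k5 : t = "starting"
    · subst k5; decide
    have hT : pvSEV = (((((PySem.Dict.empty.insert "down" 4).insert "stale" 3).insert
        "ok" 1).insert "disabled" 0).insert "starting" 0) := by rfl
    simp only [pvSevGet, hT]
    simp [PySem.Dict.getD_insert, k1, k2, k3, k4, k5]

lemma pvC_bounds (ss : List (Option String)) : 0 ≤ pvC ss ∧ pvC ss ≤ 4 := by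
  unfold pvC; split_ifs <;> omega

-- one step of Source B's loop adds its severity by max
lemma pvC_cons (s : Option String) (t : List (Option String)) :
    pvC (s :: t) = max (pvSevGet s) (pvC t) := by
  rw [pvSev_eq]
  unfold pvC
  simp only [List.any_cons, pvExtra, Bool.or_eq_true, Bool.not_eq_eq_eq_not, Bool.not_true]
  split_ifs <;> simp_all

-- Source B's fold computes the worst severity
lemma pvFold (ss : List (Option String)) (w : Int) (hw : 0 ≤ w) :
    ss.foldl (fun w s => max w (pvSevGet s)) w = max w (pvC ss) := by
  induction ss generalizing w with
  | nil => simp [pvC]; omega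
  | cons s t ih =>
    simp only [List.foldl_cons]
    rw [ih (max w (pvSevGet s)) (le_trans hw (le_max_left _ _)), pvC_cons, max_assoc]

-- both programs, expressed on the list of statuses, agree
lemma pv_core (ss : List (Option String)) :
    (if (PySem.Set.ofList ss).contains (some "down") then "down"
     else if (PySem.Set.ofList ss).contains (some "stale") then "degraded"
     else if (PySem.Set.ofList ss).issubset
              (PySem.Set.ofList [some "ok", some "disabled", some "starting"])
             && (PySem.Set.ofList ss).contains (some "ok") then "ok"
     else "degraded")
    = (let worst := ss.foldl (fun w s => max w (pvSevGet s)) 0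
       if worst == 4 then "down" else if worst == 1 then "ok" else "degraded") := by
  show _ = (if ss.foldl (fun w s => max w (pvSevGet s)) 0 == 4 then "down"
            else if ss.foldl (fun w s => max w (pvSevGet s)) 0 == 1 then "ok" else "degraded")
  rw [pvFold ss 0 le_rfl, max_eq_right (pvC_bounds ss).1]
  by_cases hd : some "down" ∈ ss
  · have h1 : ss.any (· == some "down") = true := List.any_eq_true.mpr ⟨_, hd, by simp⟩
    simp [hd, pvC, h1]
  · have h1 : ss.any (· == some "down") = false := by
      rw [List.any_eq_false]; intro x hx h
      exact hd ((eq_of_beq h) ▸ hx)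
    by_cases hs : some "stale" ∈ ss
    · have h2 : ss.any (· == some "stale") = true := List.any_eq_true.mpr ⟨_, hs, by simp⟩
      simp [hd, hs, pvC, h1, h2]
    · have h2 : ss.any (· == some "stale") = false := by
        rw [List.any_eq_false]; intro x hx h
        exact hs ((eq_of_beq h) ▸ hx)
      by_cases he : ∃ x ∈ ss, pvExtra x = true
      · obtain ⟨x, hx, hex⟩ := he
        have hsub : (PySem.Set.ofList ss).issubset
            (PySem.Set.ofList [some "ok", some "disabled", some "starting"]) = false := by
          rw [Bool.eq_false_iff]
          intro h
          have := (PySem.Set.issubset_iff _ _).mp h x ((PySem.Set.mem_ofList _ _).mpr hx)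
          rw [PySem.Set.mem_ofList] at this
          simp [pvExtra] at hex
          simp at this
          rcases this with h' | h' | h' <;> simp [h'] at hex
        have h3 : ss.any pvExtra = true := List.any_eq_true.mpr ⟨x, hx, hex⟩
        simp [hd, hs, hsub, pvC, h1, h2, h3]
      · have hne : ∀ x ∈ ss, pvExtra x = false := by
          intro x hx
          rw [Bool.eq_false_iff]; intro h; exact he ⟨x, hx, h⟩
        have h3 : ss.any pvExtra = false := by
          rw [List.any_eq_false]; intro x hx
          rw [hne x hx]; exact Bool.false_ne_true
        have hsub : (PySem.Set.ofList ss).issubset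
            (PySem.Set.ofList [some "ok", some "disabled", some "starting"]) = true := by
          rw [PySem.Set.issubset_iff]
          intro x hxs
          have hx := (PySem.Set.mem_ofList _ _).mp hxs
          have := hne x hx
          simp [pvExtra] at this
          rw [PySem.Set.mem_ofList]
          by_cases k1 : x = some "down"
          · exact absurd (k1 ▸ hx) hd
          by_cases k2 : x = some "stale"
          · exact absurd (k2 ▸ hx) hs
          by_cases k3 : x = some "ok"
          · simp [k3]
          by_cases k4 : x = some "disabled"
          · simp [k4]
          have k5 := this k1 k2 k3 k4
          simp [k5]
        by_cases hk : some "ok" ∈ ss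
        · have h4 : ss.any (· == some "ok") = true := List.any_eq_true.mpr ⟨_, hk, by simp⟩
          simp [hd, hs, hsub, hk, pvC, h1, h2, h3, h4]
        · have h4 : ss.any (· == some "ok") = false := by
            rw [List.any_eq_false]; intro x hx h
            exact hk ((eq_of_beq h) ▸ hx)
          simp [hd, hs, hsub, hk, pvC, h1, h2, h3, h4]

-- ===== VERDICT (by name: the statement is the Claim_ definition above) =====
theorem rollup_py_spec : Claim_equal_rollup_py := by
  intro probes _
  show rollup_py probes = rollup_py_alt probes
  unfold rollup_py rollup_py_alt
  refine (pv_core _).trans ?_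
  rw [List.foldl_map]
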